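-- pv_equiv track=rewrite | github.com/PaderinaViola/prg-basics | 04-Functions/7-15-training.py | f
-- ===== SOURCE A (Python) =====
-- def f(detector):
--     count = 0
--     for sign in detector:
--         if sign == "+":
--             count += 1
--         elif sign == "-":
--             count -= 1
--         if count >= 3:
--             return True
--     return False
-- ===== SOURCE B (Python) =====
-- def f(detector):
--     deltas = [1 if s == "+" else -1 if s == "-" else 0 for s in detector]
--
--     def solve(lo, hi):
--         # (sum, max prefix sum incl. empty prefix) of deltas[lo:hi], divide & conquer
--         if hi - lo == 0:
--             return (0, 0)
--         if hi - lo == 1: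
--             d = deltas[lo]
--             return (d, max(0, d))
--         mid = (lo + hi) // 2
--         s1, b1 = solve(lo, mid)
--         s2, b2 = solve(mid, hi)
--         return (s1 + s2, max(b1, s1 + b2))
--
--     return solve(0, len(deltas))[1] >= 3
-- ===== Notes on version B (the rewrite author's own statement) =====
-- stated objective: alternative
-- what changed: Replaced the left-to-right counter scan with early return by a divide-and-conquer pass computing (total sum, maximum prefix sum) of the +1/-1/0 delta sequence via the combine rule max(b1, s1+b2), answering maxprefix >= 3; the counter never exceeds 3 before returning in A, so reaching 3 is exactly maxprefix >= 3.
import Mathlib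
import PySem

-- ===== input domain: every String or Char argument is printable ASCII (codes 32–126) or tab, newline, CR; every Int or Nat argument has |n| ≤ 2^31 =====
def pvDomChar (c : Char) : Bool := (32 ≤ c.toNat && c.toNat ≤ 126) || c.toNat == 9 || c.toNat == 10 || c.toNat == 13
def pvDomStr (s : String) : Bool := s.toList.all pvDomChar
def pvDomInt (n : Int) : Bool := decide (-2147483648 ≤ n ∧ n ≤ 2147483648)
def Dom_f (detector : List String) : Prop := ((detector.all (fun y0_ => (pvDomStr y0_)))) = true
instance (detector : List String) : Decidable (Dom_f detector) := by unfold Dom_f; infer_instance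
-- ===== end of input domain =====

-- B replaces A's left-to-right counter scan by a divide-and-conquer computation of the
-- maximum prefix sum of the +1/-1/0 delta sequence; same values everywhere.

-- ===== PORT A =====
-- A's for-loop with the running counter and early return, as structural recursion
def fLoop (xs : List String) (count : Int) : Bool :=
  match xs with
  | [] => false
  | sign :: rest =>
      let count' := if sign == "+" then count + 1 else if sign == "-" then count - 1 else count
      if count' ≥ 3 then true else fLoop rest count'

def f (detector : List String) : Bool := fLoop detector 0

-- ===== PORT B =====
-- Source B's solve(lo, hi) over deltas[lo:hi], as the same divide & conquer on the sublist:
-- returns (sum, max prefix sum incl. empty prefix)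
def fSolve : List Int → Int × Int
  | [] => (0, 0)
  | [d] => (d, max 0 d)
  | x :: y :: rest =>
      let xs := x :: y :: rest
      let mid := xs.length / 2
      let p := fSolve (xs.take mid)
      let q := fSolve (xs.drop mid)
      (p.1 + q.1, max p.2 (p.1 + q.2))
termination_by xs => xs.length
decreasing_by
  · simp [List.length_take]; omega
  · simp [List.length_drop]; omega

def f_alt (detector : List String) : Bool :=
  let deltas := detector.map (fun s => if s == "+" then (1 : Int) else if s == "-" then -1 else 0)
  decide ((fSolve deltas).2 ≥ 3)

-- ===== PRECONDITION & SPEC =====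
def Spec_f (detector : List String) (out : Bool) : Prop := out = f_alt detector
instance (detector : List String) (out : Bool) : Decidable (Spec_f detector out) := by unfold Spec_f; infer_instance

-- ===== CLAIM (what is proved, stated in full; the proofs are below) =====
def Claim_equal_f : Prop := ∀ (detector : List String), Dom_f detector → Spec_f detector (f detector)

-- ===== LEMMAS AND PROOFS =====
-- specification of the max prefix sum (over all prefixes, including the empty one)
def bestPre : List Int → Int
  | [] => 0
  | d :: ds => max 0 (d + bestPre ds)

theorem bestPre_nonneg (xs : List Int) : 0 ≤ bestPre xs := by
  cases xs <;> simp [bestPre]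

theorem bestPre_append (xs ys : List Int) :
    bestPre (xs ++ ys) = max (bestPre xs) (xs.sum + bestPre ys) := by
  induction xs with
  | nil => have := bestPre_nonneg ys; simp [bestPre]; omega
  | cons d ds ih => simp [bestPre, ih]; omega

theorem fSolve_eq (xs : List Int) : fSolve xs = (xs.sum, bestPre xs) := by
  induction xs using fSolve.induct with
  | case1 => simp [fSolve, bestPre]
  | case2 d => simp [fSolve, bestPre]
  | case3 x y rest xs mid ih1 ih2 =>
      have hxs : xs = x :: y :: rest := rfl
      have hmid : mid = xs.length / 2 := rfl
      rw [hxs] at hmid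
      rw [hxs, hmid] at ih1 ih2
      rw [fSolve.eq_3, ih1, ih2]
      have h := List.take_append_drop ((x :: y :: rest).length / 2) (x :: y :: rest)
      conv_rhs => rw [← h]
      rw [List.sum_append, bestPre_append]

-- A's loop, while the counter is below 3, answers exactly "max prefix sum pushes it to 3"
theorem fLoop_eq_bestPre (xs : List String) (c : Int) (hc : c < 3) :
    fLoop xs c =
      decide (c + bestPre (xs.map (fun s => if s == "+" then (1 : Int) else if s == "-" then -1 else 0)) ≥ 3) := by
  induction xs generalizing c with
  | nil => simp [fLoop, bestPre]; omega
  | cons sign rest ih =>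
      simp only [fLoop, List.map, bestPre]
      set d : Int := if sign == "+" then 1 else if sign == "-" then -1 else 0 with hd
      have hc' : (if sign == "+" then c + 1 else if sign == "-" then c - 1 else c) = c + d := by
        rw [hd]; split_ifs <;> ring
      rw [hc']
      by_cases h : c + d ≥ 3
      · have hb := bestPre_nonneg (rest.map (fun s => if s == "+" then (1 : Int) else if s == "-" then -1 else 0))
        rw [if_pos h]
        symm
        simp only [decide_eq_true_eq]
        rw [← hd]
        omega
      · rw [if_neg h, ih (c + d) (by omega)]
        simp only [decide_eq_decide]
        rw [← hd]
        have hb := bestPre_nonneg (rest.map (fun s => if s == "+" then (1 : Int) else if s == "-" then -1 else 0))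
        constructor <;> intro <;> omega

-- ===== VERDICT (by name: the statement is the Claim_ definition above) =====
theorem f_spec : Claim_equal_f := by
  intro detector _
  show fLoop detector 0 =
    (let deltas := detector.map (fun s => if s == "+" then (1 : Int) else if s == "-" then -1 else 0)
     decide ((fSolve deltas).2 ≥ 3))
  simp only []
  rw [fSolve_eq, fLoop_eq_bestPre detector 0 (by norm_num)]
  simp
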